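-- pv_equiv track=rewrite | github.com/thorwhalen/ef | ef/plugins/adaptive_segmentation.py | content_aware_segmenter
-- ===== SOURCE A (Python) =====
-- from typing import Any, Callable, Optional
--
-- def content_aware_segmenter(
--     source: Any,
--     detect_sections: bool = True,
--     preserve_context: bool = True
-- ) -> dict[str, str]:
--     """
--     Segment based on content structure detection.
--
--     Detects:
--     - Headers and sections
--     - List items
--     - Code blocks
--     - Quotes
--
--     Args:
--         source: Text to segment
--         detect_sections: Whether to detect section headers
--         preserve_context: Whether to preserve contextual groupings
--
--     Returns:
--         Structurally-aware segments
--     """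
--     if isinstance(source, dict):
--         source = '\n\n'.join(source.values())
--
--     segments = {}
--     lines = source.split('\n')
--
--     current_section = []
--     section_idx = 0
--     in_code_block = False
--
--     for line in lines:
--         # Detect code blocks
--         if line.strip().startswith('```'):
--             in_code_block = not in_code_block
--             current_section.append(line)
--             continue
--
--         # Detect section headers
--         if detect_sections and not in_code_block:
--             if line.startswith('#') or (line and line[0].isupper() and ':' in line):
--                 # New section
--                 if current_section:
--                     segments[f'section_{section_idx}'] = '\n'.join(current_section)
--                     section_idx += 1
--                     current_section = []
--
--         current_section.append(line)
--
--         # Break on double newline if not preserving context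
--         if not preserve_context and line == '':
--             if current_section:
--                 segments[f'section_{section_idx}'] = '\n'.join(current_section)
--                 section_idx += 1
--                 current_section = []
--
--     # Add final section
--     if current_section:
--         segments[f'section_{section_idx}'] = '\n'.join(current_section)
--
--     return segments
-- ===== SOURCE B (Python) =====
-- def content_aware_segmenter(source, detect_sections=True, preserve_context=True):
--     """Two-pass re-implementation: first compute the cut indices that
--     partition the lines, then slice and number the sections."""
--     if isinstance(source, dict):
--         source = '\n\n'.join(source.values())
--
--     lines = source.split('\n')
--
--     # Pass 1: collect cut positions (a section starts at each cut).
--     cuts = []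
--     last_cut = 0
--     in_code = False
--     for i, line in enumerate(lines):
--         if line.strip().startswith('```'):
--             in_code = not in_code
--             continue
--         if (detect_sections and not in_code and last_cut < i
--                 and (line.startswith('#')
--                      or (line and line[0].isupper() and ':' in line))):
--             cuts.append(i)      # header begins the next section
--             last_cut = i
--         if not preserve_context and line == '':
--             cuts.append(i + 1)  # blank line ends the current section
--             last_cut = i + 1
--
--     # Pass 2: slice between consecutive bounds and number the pieces.
--     bounds = [0] + cuts + [len(lines)]
--     segments = {}
--     idx = 0
--     for a, b in zip(bounds, bounds[1:]):
--         if a < b: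
--             segments[f'section_{idx}'] = '\n'.join(lines[a:b])
--             idx += 1
--     return segments
-- ===== Notes on version B (the rewrite author's own statement) =====
-- stated objective: alternative
-- what changed: Replaces A's single stateful loop (segments dict, current_section buffer, section_idx threaded together) by two passes: a first pass that only records the cut indices partitioning the line list (header cuts before the line, blank-line cuts after it), and a second pass that slices lines between consecutive bounds and numbers the nonempty pieces.
import Mathlib
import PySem

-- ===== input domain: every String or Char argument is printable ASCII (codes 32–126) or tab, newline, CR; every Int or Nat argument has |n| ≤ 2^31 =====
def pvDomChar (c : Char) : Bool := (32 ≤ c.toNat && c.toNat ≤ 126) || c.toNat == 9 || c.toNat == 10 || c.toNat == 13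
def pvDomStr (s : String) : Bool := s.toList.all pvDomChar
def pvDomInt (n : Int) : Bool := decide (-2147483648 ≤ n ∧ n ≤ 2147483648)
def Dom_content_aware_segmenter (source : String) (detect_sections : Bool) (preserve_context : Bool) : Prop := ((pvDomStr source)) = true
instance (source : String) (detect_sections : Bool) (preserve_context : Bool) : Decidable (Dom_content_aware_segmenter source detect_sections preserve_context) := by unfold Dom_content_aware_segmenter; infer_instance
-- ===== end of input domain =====

-- B re-implements the segmenter in two passes (collect cut indices, then slice);
-- return-value equivalence only (neither program mutates its arguments).
-- The Python dict of segments is ported as an association list: the keys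
-- 'section_{idx}' are fresh on every assignment (idx strictly increases), so
-- each dict assignment is an append.

-- ===== PORT A =====
-- shared helpers (both Pythons contain these exact expressions)
-- line.strip().startswith('```')
def pvIsFence (line : String) : Bool := PySem.Str.startswith (PySem.Str.strip line) "```"
-- line.startswith('#') or (line and line[0].isupper() and ':' in line)
def pvIsHeader (line : String) : Bool :=
  PySem.Str.startswith line "#" ||
    (match line.toList with
     | [] => false
     | c :: _ => PySem.Chars.isupper c && PySem.Str.isIn ":" line)
-- f'section_{idx}'
def pvSecName (idx : Int) : String := String.mk ("section_".toList ++ PySem.Int.toChars idx)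
-- source.split('\n')  (sep is the nonempty literal '\n', so split? never returns none)
def pvLines (source : String) : List String := (PySem.Str.split? source "\n").getD []

-- A's single loop: state (segments, current_section, section_idx, in_code_block)
def pvLoopA (detect preserve : Bool) : List String → List (String × String) → List String → Int → Bool → List (String × String)
  | [], segs, cur, idx, _code =>
      if cur.isEmpty then segs else segs ++ [(pvSecName idx, PySem.Str.join "\n" cur)]
  | line :: rest, segs, cur, idx, code =>
      if pvIsFence line then
        pvLoopA detect preserve rest segs (cur ++ [line]) idx (!code)
      else
        let st :=
          if detect && !code && pvIsHeader line then
            if cur.isEmpty then (segs, cur, idx)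
            else (segs ++ [(pvSecName idx, PySem.Str.join "\n" cur)], ([] : List String), idx + 1)
          else (segs, cur, idx)
        let cur' := st.2.1 ++ [line]
        if !preserve && (line == "") then
          if cur'.isEmpty then pvLoopA detect preserve rest st.1 cur' st.2.2 code
          else pvLoopA detect preserve rest (st.1 ++ [(pvSecName st.2.2, PySem.Str.join "\n" cur')]) [] (st.2.2 + 1) code
        else pvLoopA detect preserve rest st.1 cur' st.2.2 code

def content_aware_segmenter (source : String) (detect_sections : Bool) (preserve_context : Bool) : List (String × String) :=
  pvLoopA detect_sections preserve_context (pvLines source) [] [] 0 false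

-- ===== PORT B =====
-- pass 1: one step of the cut-collecting fold over enumerate(lines); state (cuts, last_cut, in_code)
def pvCutsStep (detect preserve : Bool) (st : List Int × Int × Bool) (p : Int × String) : List Int × Int × Bool :=
  if pvIsFence p.2 then (st.1, st.2.1, !st.2.2)
  else
    let st2 :=
      if detect && !st.2.2 && decide (st.2.1 < p.1) && pvIsHeader p.2
      then (st.1 ++ [p.1], p.1) else (st.1, st.2.1)
    if !preserve && (p.2 == "") then (st2.1 ++ [p.1 + 1], p.1 + 1, st.2.2)
    else (st2.1, st2.2, st.2.2)

-- pass 2: the loop 'for a, b in zip(bounds, bounds[1:])'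
def pvRenderLoop (lines : List String) : List (Int × Int) → List (String × String) → Int → List (String × String)
  | [], segs, _idx => segs
  | (a, b) :: ps, segs, idx =>
      if a < b then
        pvRenderLoop lines ps
          (segs ++ [(pvSecName idx, PySem.Str.join "\n" (PySem.List.slice lines (some a) (some b)))]) (idx + 1)
      else pvRenderLoop lines ps segs idx

def content_aware_segmenter_alt (source : String) (detect_sections : Bool) (preserve_context : Bool) : List (String × String) :=
  let lines := pvLines source
  let cuts := ((PySem.List.enumerate lines 0).foldl (pvCutsStep detect_sections preserve_context) ([], 0, false)).1
  let bounds := 0 :: cuts ++ [(lines.length : Int)]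
  pvRenderLoop lines (bounds.zip bounds.tail) [] 0

-- ===== PRECONDITION & SPEC =====
def Spec_content_aware_segmenter (source : String) (detect_sections : Bool) (preserve_context : Bool) (out : List (String × String)) : Prop := out = content_aware_segmenter_alt source detect_sections preserve_context
instance (source : String) (detect_sections : Bool) (preserve_context : Bool) (out : List (String × String)) : Decidable (Spec_content_aware_segmenter source detect_sections preserve_context out) := by unfold Spec_content_aware_segmenter; infer_instance

-- ===== CLAIM (what is proved, stated in full; the proofs are below) =====
def Claim_equal_content_aware_segmenter : Prop := ∀ (source : String) (detect_sections : Bool) (preserve_context : Bool), Dom_content_aware_segmenter source detect_sections preserve_context → Spec_content_aware_segmenter source detect_sections preserve_context (content_aware_segmenter source detect_sections preserve_context)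

-- ===== LEMMAS AND PROOFS =====

-- proof-side common spec: the list of line groups both programs emit, in order
def pvGroups (detect preserve : Bool) : List String → List String → Bool → List (List String)
  | [], cur, _code => if cur.isEmpty then [] else [cur]
  | line :: rest, cur, code =>
    if pvIsFence line then pvGroups detect preserve rest (cur ++ [line]) (!code)
    else if detect && !code && pvIsHeader line && !cur.isEmpty then
      cur :: pvGroups detect preserve rest [line] code
    else if !preserve && (line == "") then
      (cur ++ [line]) :: pvGroups detect preserve rest [] code
    else pvGroups detect preserve rest (cur ++ [line]) code

-- numbering of the groups
def pvNumber : Int → List (List String) → List (String × String)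
  | _, [] => []
  | idx, g :: gs => (pvSecName idx, PySem.Str.join "\n" g) :: pvNumber (idx + 1) gs

-- a header line is nonempty
lemma pvIsHeader_ne_blank {line : String} (h : pvIsHeader line = true) : (line == "") = false := by
  by_cases he : line = ""
  · subst he; exact absurd h (by decide)
  · simpa using he

-- the middle block of a concatenation, as a Python slice
lemma pvSlice_middle (pre cur rest : List String) :
    PySem.List.slice (pre ++ (cur ++ rest)) (some (pre.length : Int))
      (some ((pre.length : Int) + cur.length)) = cur := by
  have h : ((pre.length : Int) + cur.length) = ((pre.length + cur.length : Nat) : Int) := by push_cast; ring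
  rw [h, PySem.List.slice_natCast]
  rw [List.drop_left, Nat.add_sub_cancel_left, List.take_left]

-- A's loop emits exactly the numbered groups
lemma pvLoopA_eq_groups (detect preserve : Bool) :
    ∀ (rest : List String) (segs : List (String × String)) (cur : List String) (idx : Int) (code : Bool),
      pvLoopA detect preserve rest segs cur idx code
        = segs ++ pvNumber idx (pvGroups detect preserve rest cur code) := by
  intro rest
  induction rest with
  | nil =>
    intro segs cur idx code
    by_cases hc : cur.isEmpty
    · simp [pvLoopA, pvGroups, pvNumber, hc]
    · simp [pvLoopA, pvGroups, pvNumber, hc]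
  | cons line rest ih =>
    intro segs cur idx code
    by_cases hf : pvIsFence line
    · simp [pvLoopA, pvGroups, hf, ih]
    · by_cases hh : (detect && !code && pvIsHeader line) = true
      · have hhl : pvIsHeader line = true := by
          simp only [Bool.and_eq_true] at hh; exact hh.2
        have hb := pvIsHeader_ne_blank hhl
        by_cases hc : cur.isEmpty
        · -- header but current empty: just append
          simp only [pvLoopA, pvGroups, hf, hh, hc, if_false, if_true, hb]
          simp [hb, ih, hh, hc]
        · simp only [pvLoopA, pvGroups, hf, hh, hc, hb]
          simp [hb, ih, hh, hc, pvNumber]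
      · -- not header branch
        by_cases hbl : (!preserve && (line == "")) = true
        · simp only [pvLoopA, pvGroups, hf, hh]
          simp [hh, hbl, ih, pvNumber]
        · simp only [pvLoopA, pvGroups, hf, hh]
          simp [hh, hbl, ih]

-- proof-side recursive form of pass 1
def pvCuts (detect preserve : Bool) : List String → Int → Int → Bool → List Int
  | [], _i, _lastCut, _code => []
  | line :: rest, i, lastCut, code =>
    if pvIsFence line then pvCuts detect preserve rest (i + 1) lastCut (!code)
    else if detect && !code && decide (lastCut < i) && pvIsHeader line then
      i :: pvCuts detect preserve rest (i + 1) i code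
    else if !preserve && (line == "") then
      (i + 1) :: pvCuts detect preserve rest (i + 1) (i + 1) code
    else pvCuts detect preserve rest (i + 1) lastCut code

-- the fold of pass 1 computes pvCuts
lemma pvCutsFold_eq (detect preserve : Bool) :
    ∀ (rest : List String) (i : Int) (cuts0 : List Int) (lastCut : Int) (code : Bool),
      ((PySem.List.enumerate rest i).foldl (pvCutsStep detect preserve) (cuts0, lastCut, code)).1
        = cuts0 ++ pvCuts detect preserve rest i lastCut code := by
  intro rest
  induction rest with
  | nil => intro i cuts0 lastCut code; simp [PySem.List.enumerate_nil, pvCuts]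
  | cons line rest ih =>
    intro i cuts0 lastCut code
    rw [PySem.List.enumerate_cons, List.foldl_cons]
    by_cases hf : pvIsFence line
    · simp only [pvCutsStep, pvCuts, hf, if_true, ih]
    · by_cases hh : (detect && !code && decide (lastCut < i) && pvIsHeader line) = true
      · have hb := pvIsHeader_ne_blank (by simp only [Bool.and_eq_true] at hh; exact hh.2)
        simp only [pvCutsStep, pvCuts, hf, hh, hb, Bool.and_false, if_false, if_true, ih]
        simp
      · by_cases hbl : (!preserve && (line == "")) = true
        · simp only [pvCutsStep, pvCuts, hf, hh, hbl, if_false, if_true, ih]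
          simp
        · simp [pvCutsStep, pvCuts, hf, hh, hbl, ih]

-- pass 2 over the cut bounds renders exactly the numbered groups
lemma pvRender_eq_groups (detect preserve : Bool) :
    ∀ (rest pre cur : List String) (code : Bool) (segs : List (String × String)) (idx : Int)
      (L i n : Int), L = pre.length → i = L + cur.length → n = i + rest.length →
      pvRenderLoop (pre ++ (cur ++ rest))
        ((L :: pvCuts detect preserve rest i L code ++ [n]).zip
          (L :: pvCuts detect preserve rest i L code ++ [n]).tail) segs idx
        = segs ++ pvNumber idx (pvGroups detect preserve rest cur code) := by
  intro rest
  induction rest with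
  | nil =>
    intro pre cur code segs idx L i n hL hi hn
    have hn0 : n = i := by simp at hn; omega
    by_cases hc : cur.isEmpty
    · have hc0 : cur = [] := by simpa using hc
      subst hc0
      have hnotlt : ¬ (L < n) := by simp at hi; omega
      simp [pvCuts, pvRenderLoop, pvGroups, pvNumber, List.zip_cons_cons, hnotlt]
    · have hlt : L < n := by
        have : 0 < cur.length := List.length_pos_iff.mpr (by simpa using hc)
        omega
      have hsl : PySem.List.slice (pre ++ cur) (some L) (some n) = cur := by
        rw [hn0, hi, hL]
        have := pvSlice_middle pre cur []
        simpa using this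
      simp [pvCuts, pvRenderLoop, pvGroups, pvNumber, List.zip_cons_cons, hlt, hsl, hc]
  | cons line rest ih =>
    intro pre cur code segs idx L i n hL hi hn
    have hn' : n = (i + 1) + rest.length := by simp at hn; omega
    by_cases hf : pvIsFence line
    · simp only [pvCuts, pvGroups, hf, if_true]
      have := ih pre (cur ++ [line]) (!code) segs idx L (i + 1) n hL
        (by simp at hi ⊢; push_cast; omega) hn'
      simpa using this
    · by_cases hh : (detect && !code && pvIsHeader line) = true
      · have hhl : pvIsHeader line = true := by
          simp only [Bool.and_eq_true] at hh; exact hh.2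
        have hb := pvIsHeader_ne_blank hhl
        by_cases hc : cur.isEmpty
        · have hc0 : cur = [] := by simpa using hc
          subst hc0
          have hnotlt : ¬ (L < i) := by simp at hi; omega
          have hcond : (detect && !code && decide (L < i) && pvIsHeader line) = false := by
            simp [hnotlt]
          have hgcond : (detect && !code && pvIsHeader line && !(List.isEmpty ([] : List String))) = false := by
            simp
          simp only [pvCuts, pvGroups, hcond, hgcond, hf, hb, Bool.and_false, Bool.false_eq_true, if_false]
          have := ih pre [line] code segs idx L (i + 1) n hL (by simp at hi ⊢; omega) hn'
          simpa using this
        · have hlt : L < i := by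
            have : 0 < cur.length := List.length_pos_iff.mpr (by simpa using hc)
            omega
          have hcond : (detect && !code && decide (L < i) && pvIsHeader line) = true := by
            simp only [Bool.and_eq_true] at hh ⊢
            exact ⟨⟨hh.1, by simpa using hlt⟩, hh.2⟩
          have hgcond : (detect && !code && pvIsHeader line && !cur.isEmpty) = true := by
            simp only [Bool.and_eq_true] at hh ⊢
            exact ⟨hh, by simpa using hc⟩
          have hsl : PySem.List.slice (pre ++ (cur ++ (line :: rest))) (some L) (some i) = cur := by
            rw [hL, hi, hL]; exact pvSlice_middle pre cur (line :: rest)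
          simp only [pvCuts, pvGroups, hf, hcond, hgcond, Bool.false_eq_true, if_false, if_true,
            List.cons_append, List.zip_cons_cons, List.tail_cons, pvRenderLoop, if_pos hlt, hsl,
            pvNumber]
          have := ih (pre ++ cur) [line] code
            (segs ++ [(pvSecName idx, PySem.Str.join "\n" cur)]) (idx + 1) i (i + 1) n
            (by simp at hi ⊢; push_cast; omega) (by simp) hn'
          simp only [List.append_assoc, List.singleton_append] at this
          rw [← List.append_assoc] at this
          simpa using this
      · have hcond : (detect && !code && decide (L < i) && pvIsHeader line) = false := by
          rcases Bool.eq_false_or_eq_true detect with hd | hd <;>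
            rcases Bool.eq_false_or_eq_true code with hco | hco <;>
            rcases Bool.eq_false_or_eq_true (pvIsHeader line) with hhe | hhe <;>
            simp_all
        have hgcond : (detect && !code && pvIsHeader line && !cur.isEmpty) = false := by
          rcases Bool.eq_false_or_eq_true detect with hd | hd <;>
            rcases Bool.eq_false_or_eq_true code with hco | hco <;>
            rcases Bool.eq_false_or_eq_true (pvIsHeader line) with hhe | hhe <;>
            simp_all
        by_cases hbl : (!preserve && (line == "")) = true
        · have hlt : L < i + 1 := by omega
          have hsl : PySem.List.slice (pre ++ (cur ++ (line :: rest))) (some L) (some (i + 1))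
              = cur ++ [line] := by
            have harr : pre ++ (cur ++ (line :: rest)) = pre ++ ((cur ++ [line]) ++ rest) := by simp
            have hln : i + 1 = (pre.length : Int) + ((cur ++ [line]).length : Nat) := by
              simp at hi ⊢; push_cast; omega
            rw [harr, hln, hL]; exact pvSlice_middle pre (cur ++ [line]) rest
          simp only [pvCuts, pvGroups, hf, hcond, hgcond, hbl, Bool.false_eq_true, if_false, if_true,
            List.cons_append, List.zip_cons_cons, List.tail_cons, pvRenderLoop, if_pos hlt, hsl,
            pvNumber]
          have := ih (pre ++ (cur ++ [line])) [] code
            (segs ++ [(pvSecName idx, PySem.Str.join "\n" (cur ++ [line]))]) (idx + 1) (i + 1) (i + 1) n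
            (by simp at hi ⊢; push_cast; omega) (by simp) hn'
          simp only [List.append_assoc, List.nil_append] at this
          rw [← List.append_assoc] at this
          simpa using this
        · simp only [pvCuts, pvGroups, hf, hcond, hgcond, hbl, Bool.false_eq_true, if_false]
          have := ih pre (cur ++ [line]) code segs idx L (i + 1) n hL
            (by simp at hi ⊢; push_cast; omega) hn'
          simpa using this

-- ===== VERDICT (by name: the statement is the Claim_ definition above) =====
theorem content_aware_segmenter_spec : Claim_equal_content_aware_segmenter := by
  intro source detect preserve _dom
  unfold Spec_content_aware_segmenter content_aware_segmenter content_aware_segmenter_alt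
  simp only []
  rw [pvLoopA_eq_groups, pvCutsFold_eq]
  have h := pvRender_eq_groups detect preserve (pvLines source) [] [] false [] 0 0 0
      ((pvLines source).length : Int) (by simp) (by simp) (by simp)
  simp only [List.nil_append] at h ⊢
  exact h.symm
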